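-- pv_equiv track=rewrite | github.com/kashparty/unit_converter | main.py | find_penultimate_conversion
-- ===== SOURCE A (Python) =====
-- def find_penultimate_conversion(input_unit, output_unit, conversion_table):
--     units_to_explore = [input_unit]
--     units_explored = []
--
--     while output_unit not in units_explored:
--         while len(units_to_explore) > 0:
--             unit_to_explore = units_to_explore[0]
--
--             units_explored.append(unit_to_explore)
--             units_to_explore.pop(0)
--             for conversion in conversion_table.keys():
--                 if conversion[0] == unit_to_explore and conversion[1] not in units_explored:
--                     if output_unit == conversion[1]:
--                         return (True, conversion[0])
--                     else:
--                         units_to_explore.append(conversion[1])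
--
--             if len(units_to_explore) == 0:
--                 return (False, None)
-- ===== SOURCE B (Python) =====
-- def find_penultimate_conversion(input_unit, output_unit, conversion_table):
--     # Build an adjacency index once, then BFS with a seen-set and an index-cursor queue.
--     adjacent = {}
--     for source, target in conversion_table.keys():
--         adjacent.setdefault(source, []).append(target)
--     seen = {input_unit}
--     queue = [input_unit]
--     i = 0
--     while i < len(queue):
--         unit = queue[i]
--         i += 1
--         for target in adjacent.get(unit, ()):
--             if target not in seen:
--                 if target == output_unit:
--                     return (True, unit)
--                 seen.add(target)
--                 queue.append(target)
--     return (False, None)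
-- ===== Notes on version B (the rewrite author's own statement) =====
-- stated objective: alternative
-- what changed: A rescans the entire conversion table and does list-membership tests on every pop of a duplicate-admitting queue; B precomputes an adjacency index once and runs a standard BFS with a seen-set that dedups at enqueue time.
import Mathlib
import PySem

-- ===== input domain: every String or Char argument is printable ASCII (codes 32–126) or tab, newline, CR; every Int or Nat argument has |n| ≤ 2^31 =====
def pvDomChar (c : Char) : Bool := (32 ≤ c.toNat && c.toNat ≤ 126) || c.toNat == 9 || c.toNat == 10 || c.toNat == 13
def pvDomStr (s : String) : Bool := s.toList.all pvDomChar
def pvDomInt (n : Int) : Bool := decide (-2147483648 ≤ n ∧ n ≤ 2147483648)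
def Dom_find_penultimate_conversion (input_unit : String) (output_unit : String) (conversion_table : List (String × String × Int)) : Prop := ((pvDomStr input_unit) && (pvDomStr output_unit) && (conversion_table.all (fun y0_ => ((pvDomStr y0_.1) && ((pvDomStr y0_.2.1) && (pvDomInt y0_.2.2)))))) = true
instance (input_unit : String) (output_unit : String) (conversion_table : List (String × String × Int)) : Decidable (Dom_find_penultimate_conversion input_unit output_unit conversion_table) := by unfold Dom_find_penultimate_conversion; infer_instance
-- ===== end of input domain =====

-- B replaces A's per-pop scan of the whole conversion table and list-membership tests by a
-- precomputed adjacency index plus a seen-set BFS (objective: alternative algorithm).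

-- ===== PORT A =====
-- the dict keys of conversion_table (first-occurrence order of the (source, target) pairs)
def pvKeys (conversion_table : List (String × String × Int)) : List (String × String) :=
  (conversion_table.foldl (fun d x => d.insert (x.1, x.2.1) x.2.2)
    (PySem.Dict.empty : PySem.Dict (String × String) Int)).keys

-- A's inner `for conversion in conversion_table.keys()` loop: either the early
-- `return (True, conversion[0])` fires (Sum.inl) or the list of appended targets results (Sum.inr)
def pvAScan (u output : String) (explored : List String) :
    List (String × String) → Sum String (List String)
  | [] => .inr []
  | k :: ks =>
    if k.1 = u ∧ k.2 ∉ explored then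
      if output = k.2 then .inl k.1
      else
        match pvAScan u output explored ks with
        | .inl r => .inl r
        | .inr vs => .inr (k.2 :: vs)
    else pvAScan u output explored ks

-- closed characterization of the scan (also needed by pvALoop's invariant/termination proofs)
theorem pvAScan_eq (u output : String) (e : List String) (ks : List (String × String)) :
    pvAScan u output e ks =
      if (∃ k ∈ ks, k.1 = u ∧ k.2 = output ∧ output ∉ e) then Sum.inl u
      else Sum.inr ((ks.filter (fun k => k.1 = u ∧ k.2 ∉ e)).map (fun k => k.2)) := by
  induction ks with
  | nil => simp [pvAScan]
  | cons k ks ih =>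
    by_cases h1 : k.1 = u ∧ k.2 ∉ e
    · by_cases h2 : output = k.2
      · have hc : ∃ k' ∈ k :: ks, k'.1 = u ∧ k'.2 = output ∧ output ∉ e :=
          ⟨k, List.mem_cons_self, h1.1, h2.symm, h2 ▸ h1.2⟩
        simp only [pvAScan]
        rw [if_pos h1, if_pos h2, if_pos hc, h1.1]
      · have hcond : (∃ k' ∈ k :: ks, k'.1 = u ∧ k'.2 = output ∧ output ∉ e) ↔
            (∃ k' ∈ ks, k'.1 = u ∧ k'.2 = output ∧ output ∉ e) := by
          constructor
          · rintro ⟨k', hk', h⟩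
            rcases List.mem_cons.mp hk' with rfl | hk'
            · exact absurd h.2.1.symm h2
            · exact ⟨k', hk', h⟩
          · rintro ⟨k', hk', h⟩; exact ⟨k', List.mem_cons_of_mem _ hk', h⟩
        simp only [pvAScan, if_pos h1, if_neg h2, ih]
        by_cases hc : ∃ k' ∈ ks, k'.1 = u ∧ k'.2 = output ∧ output ∉ e
        · rw [if_pos hc, if_pos (hcond.mpr hc)]
        · rw [if_neg hc, if_neg (fun h => hc (hcond.mp h))]
          simp [List.filter_cons, h1]
    · have hcond : (∃ k' ∈ k :: ks, k'.1 = u ∧ k'.2 = output ∧ output ∉ e) ↔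
          (∃ k' ∈ ks, k'.1 = u ∧ k'.2 = output ∧ output ∉ e) := by
        constructor
        · rintro ⟨k', hk', h⟩
          rcases List.mem_cons.mp hk' with rfl | hk'
          · exact absurd ⟨h.1, h.2.1 ▸ h.2.2⟩ h1
          · exact ⟨k', hk', h⟩
        · rintro ⟨k', hk', h⟩; exact ⟨k', List.mem_cons_of_mem _ hk', h⟩
      simp only [pvAScan, if_neg h1, ih]
      by_cases hc : ∃ k' ∈ ks, k'.1 = u ∧ k'.2 = output ∧ output ∉ e
      · rw [if_pos hc, if_pos (hcond.mpr hc)]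
      · rw [if_neg hc, if_neg (fun h => hc (hcond.mp h))]
        simp [List.filter_cons, h1]

-- every value appended by the scan is a key target not yet explored
theorem pvAScan_inr_mem {u output : String} {e : List String} {ks : List (String × String)}
    {vs : List String} (h : pvAScan u output e ks = .inr vs) :
    ∀ v ∈ vs, v ∉ e ∧ ∃ k ∈ ks, k.1 = u ∧ k.2 = v := by
  rw [pvAScan_eq] at h
  split_ifs at h
  intro v hv
  cases h
  rcases List.mem_map.mp hv with ⟨k, hk, rfl⟩
  rcases List.mem_filter.mp hk with ⟨hkmem, hkp⟩
  have hkp' : k.1 = u ∧ k.2 ∉ e := by simpa using hkp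
  exact ⟨hkp'.2, k, hkmem, hkp'.1, rfl⟩

-- a strictly stronger filter on a list containing a separating element is strictly shorter
theorem pvFilterLengthLt {α : Type} {l : List α} {p q : α → Bool}
    (hpq : ∀ x, q x = true → p x = true) {x : α} (hx : x ∈ l)
    (hpx : p x = true) (hqx : q x = false) :
    (l.filter q).length < (l.filter p).length := by
  induction l with
  | nil => cases hx
  | cons y l ih =>
    rcases List.mem_cons.mp hx with rfl | hy
    · rw [List.filter_cons, List.filter_cons, hpx, hqx]
      simp only [if_true, if_false]
      exact Nat.lt_succ_of_le (List.monotone_filter_right l hpq).length_le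
    · rw [List.filter_cons, List.filter_cons]
      cases hq : q y with
      | true =>
        rw [hpq y hq]
        simpa using Nat.succ_lt_succ (ih hy)
      | false =>
        cases hp : p y with
        | true => simpa using Nat.lt_succ_of_lt (ih hy)
        | false => simpa using ih hy

-- A's while loops: pop the queue head, append it to explored, scan the key list, append
-- the results; return (False, None) when the queue empties.  (The `[]` case is unreachable
-- from the entry call — Python's outer while would spin there.)
def pvALoop (output : String) (keys : List (String × String)) (U : List String)
    (hU : ∀ k ∈ keys, k.2 ∈ U) :
    (queue : List String) → (explored : List String) → (hq : ∀ x ∈ queue, x ∈ U) →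
      Bool × Option String
  | [], _, _ => (false, none)
  | u :: tail, explored, hq =>
    match h : pvAScan u output (explored ++ [u]) keys with
    | .inl r => (true, some r)
    | .inr vs =>
      if tail ++ vs = [] then (false, none)
      else
        pvALoop output keys U hU (tail ++ vs) (explored ++ [u])
          (fun x hx => by
            rcases List.mem_append.mp hx with hx | hx
            · exact hq x (List.mem_cons_of_mem _ hx)
            · rcases (pvAScan_inr_mem h x hx).2 with ⟨k, hk, _, rfl⟩
              exact hU k hk)
  termination_by queue explored _ =>
    ((U.filter (fun x => x ∉ explored)).length, (queue.filter (fun x => x ∈ explored)).length)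
  decreasing_by
    by_cases hu : u ∈ explored
    · have h1 : (U.filter (fun x => x ∉ explored ++ [u])).length =
          (U.filter (fun x => x ∉ explored)).length := by
        congr 1
        apply List.filter_congr
        intro x _
        simp only [List.mem_append, List.mem_singleton, decide_eq_decide]
        constructor
        · intro hnx hx; exact hnx (Or.inl hx)
        · rintro hnx (hx | rfl)
          · exact hnx hx
          · exact hnx hu
      rw [h1]
      apply Prod.Lex.right
      have h2 : ((tail ++ vs).filter (fun x => x ∈ explored ++ [u])).length =
          (tail.filter (fun x => x ∈ explored)).length := by
        rw [List.filter_append]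
        have hvs : vs.filter (fun x => x ∈ explored ++ [u]) = [] := by
          rw [List.filter_eq_nil_iff]
          intro v hv
          have := (pvAScan_inr_mem h v hv).1
          simpa using this
        rw [hvs, List.append_nil]
        congr 1
        apply List.filter_congr
        intro x _
        simp only [List.mem_append, List.mem_singleton, decide_eq_decide]
        constructor
        · rintro (hx | rfl) <;> [exact hx; exact hu]
        · exact Or.inl
      rw [h2]
      have : (u :: tail).filter (fun x => x ∈ explored) = u :: tail.filter (fun x => x ∈ explored) := by
        rw [List.filter_cons, if_pos (by simpa using hu)]
      rw [this]
      exact Nat.lt_succ_self _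
    · apply Prod.Lex.left
      apply pvFilterLengthLt (p := fun x => x ∉ explored) (q := fun x => x ∉ explored ++ [u])
      · intro x hx
        simp only [List.mem_append, decide_eq_true_eq] at hx ⊢
        intro h; exact hx (Or.inl h)
      · exact hq u List.mem_cons_self
      · simpa using hu
      · simp

def find_penultimate_conversion (input_unit : String) (output_unit : String)
    (conversion_table : List (String × String × Int)) : Bool × Option String :=
  pvALoop output_unit (pvKeys conversion_table)
    (input_unit :: (pvKeys conversion_table).map (fun k => k.2))
    (fun k hk => List.mem_cons_of_mem _ (List.mem_map_of_mem hk))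
    [input_unit] []
    (fun x hx => by
      rcases List.mem_cons.mp hx with rfl | hx
      · exact List.mem_cons_self
      · cases hx)

-- ===== PORT B =====
-- Source B: adjacency index built once (adjacent.setdefault(a, []).append(b))
def pvBAdj (keys : List (String × String)) : PySem.Dict String (List String) :=
  keys.foldl (fun d k => d.modify k.1 [] (fun l => l ++ [k.2])) PySem.Dict.empty

theorem pvBAdj_getD (keys : List (String × String)) (u : String) :
    (pvBAdj keys).getD u [] = (keys.filter (fun k => k.1 == u)).map (fun k => k.2) := by
  simpa [pvBAdj] using
    PySem.Dict.getD_foldl_modify_append (l := keys) (d := PySem.Dict.empty) (c := u)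

-- Source B's inner for loop over adjacent targets: early return (Sum.inl) or the updated seen
-- set together with the newly appended queue entries (Sum.inr)
def pvBScan (output : String) :
    (targets : List String) → (seen : PySem.Set String) →
      Sum Unit (PySem.Set String × List String)
  | [], seen => .inr (seen, [])
  | v :: vs, seen =>
    if v ∈ seen then pvBScan output vs seen
    else if v = output then .inl ()
    else
      match pvBScan output vs (PySem.Set.add seen v) with
      | .inl r => .inl r
      | .inr (s, app) => .inr (s, v :: app)

-- shape of the scan's continue case (needed by pvBLoop's termination)
theorem pvBScan_inr {output : String} {ts : List String} {seen : PySem.Set String}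
    {seen' : PySem.Set String} {app : List String}
    (h : pvBScan output ts seen = .inr (seen', app)) :
    seen' = seen ++ app ∧ ∀ v ∈ app, v ∈ ts ∧ v ∉ seen := by
  induction ts generalizing seen seen' app with
  | nil =>
    simp only [pvBScan, Sum.inr.injEq, Prod.mk.injEq] at h
    refine ⟨by simp [h.1.symm, h.2.symm], by simp [h.2.symm]⟩
  | cons v vs ih =>
    simp only [pvBScan] at h
    by_cases hv : v ∈ seen
    · rw [if_pos hv] at h
      obtain ⟨h1, h2⟩ := ih h
      exact ⟨h1, fun w hw => ⟨List.mem_cons_of_mem _ (h2 w hw).1, (h2 w hw).2⟩⟩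
    · rw [if_neg hv] at h
      by_cases ho : v = output
      · rw [if_pos ho] at h; cases h
      · rw [if_neg ho] at h
        have hadd : PySem.Set.add seen v = seen ++ [v] := by
          simp [PySem.Set.add, PySem.Set.contains, hv]
        cases hrec : pvBScan output vs (PySem.Set.add seen v) with
        | inl r => rw [hrec] at h; cases h
        | inr p =>
          rw [hrec] at h
          obtain ⟨s, app'⟩ := p
          simp only [Sum.inr.injEq, Prod.mk.injEq] at h
          obtain ⟨rfl, rfl⟩ := h
          obtain ⟨h1, h2⟩ := ih hrec
          rw [hadd] at h1 h2
          constructor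
          · rw [h1]; simp
          · intro w hw
            rcases List.mem_cons.mp hw with rfl | hw
            · exact ⟨List.mem_cons_self, hv⟩
            · have := h2 w hw
              simp only [List.mem_append, List.mem_singleton] at this
              exact ⟨List.mem_cons_of_mem _ this.1, fun hws => this.2 (Or.inl hws)⟩

-- Source B's BFS: index-cursor queue (`queue[i:]` is the recursion's todo list) with a seen set
def pvBLoop (output : String) (adj : PySem.Dict String (List String)) (U : List String)
    (hadj : ∀ u : String, ∀ v ∈ adj.getD u [], v ∈ U) :
    (todo : List String) → (seen : PySem.Set String) → Bool × Option String
  | [], _ => (false, none)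
  | u :: rest, seen =>
    match h : pvBScan output (adj.getD u []) seen with
    | .inl _ => (true, some u)
    | .inr (seen', app) => pvBLoop output adj U hadj (rest ++ app) seen'
  termination_by todo seen =>
    ((U.filter (fun x => x ∉ seen)).length, todo.length)
  decreasing_by
    obtain ⟨h1, h2⟩ := pvBScan_inr h
    cases app with
    | nil =>
      rw [h1]
      simp only [List.append_nil]
      exact Prod.Lex.right _ (by simp [Nat.lt_succ_self])
    | cons v app' =>
      apply Prod.Lex.left
      apply pvFilterLengthLt (p := fun x => x ∉ seen) (q := fun x => x ∉ seen')
      · intro x hx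
        rw [h1] at hx
        simp only [List.mem_append, decide_eq_true_eq] at hx ⊢
        intro hxs; exact hx (Or.inl hxs)
      · exact hadj u v (h2 v List.mem_cons_self).1
      · simpa using (h2 v List.mem_cons_self).2
      · rw [h1]; simp

def find_penultimate_conversion_alt (input_unit : String) (output_unit : String)
    (conversion_table : List (String × String × Int)) : Bool × Option String :=
  pvBLoop output_unit (pvBAdj (pvKeys conversion_table))
    (input_unit :: (pvKeys conversion_table).map (fun k => k.2))
    (fun u v hv => by
      rw [pvBAdj_getD] at hv
      rcases List.mem_map.mp hv with ⟨k, hk, rfl⟩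
      exact List.mem_cons_of_mem _ (List.mem_map_of_mem (List.mem_of_mem_filter hk)))
    [input_unit] (PySem.Set.ofList [input_unit])

-- ===== PRECONDITION & SPEC =====
def Spec_find_penultimate_conversion (input_unit : String) (output_unit : String) (conversion_table : List (String × String × Int)) (out : Bool × Option String) : Prop := out = find_penultimate_conversion_alt input_unit output_unit conversion_table
instance (input_unit : String) (output_unit : String) (conversion_table : List (String × String × Int)) (out : Bool × Option String) : Decidable (Spec_find_penultimate_conversion input_unit output_unit conversion_table out) := by unfold Spec_find_penultimate_conversion; infer_instance

-- ===== CLAIM (what is proved, stated in full; the proofs are below) =====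
def Claim_equal_find_penultimate_conversion : Prop := ∀ (input_unit : String) (output_unit : String) (conversion_table : List (String × String × Int)), Dom_find_penultimate_conversion input_unit output_unit conversion_table → Spec_find_penultimate_conversion input_unit output_unit conversion_table (find_penultimate_conversion input_unit output_unit conversion_table)

-- ===== LEMMAS AND PROOFS =====

-- first-occurrence trace: the elements of l not in s, first occurrences only, in order
def pvGo : List String → List String → List String
  | [], _ => []
  | x :: xs, s => if x ∈ s then pvGo xs s else x :: pvGo xs (x :: s)

theorem pvGo_congr : ∀ (l s s' : List String), (∀ x, x ∈ s ↔ x ∈ s') → pvGo l s = pvGo l s'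
  | [], _, _, _ => rfl
  | x :: xs, s, s', h => by
    simp only [pvGo]
    by_cases hx : x ∈ s
    · rw [if_pos hx, if_pos ((h x).mp hx)]
      exact pvGo_congr xs s s' h
    · rw [if_neg hx, if_neg (fun hx' => hx ((h x).mpr hx'))]
      refine congrArg _ (pvGo_congr xs _ _ (fun y => ?_))
      simp only [List.mem_cons]
      exact or_congr Iff.rfl (h y)

theorem pvGo_mem : ∀ (l s : List String) (x : String), x ∈ pvGo l s ↔ x ∈ l ∧ x ∉ s
  | [], s, x => by simp [pvGo]
  | y :: xs, s, x => by
    simp only [pvGo]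
    by_cases hy : y ∈ s
    · rw [if_pos hy, pvGo_mem xs s x]
      simp only [List.mem_cons]
      constructor
      · rintro ⟨h1, h2⟩; exact ⟨Or.inr h1, h2⟩
      · rintro ⟨h1 | h1, h2⟩
        · exact absurd (h1 ▸ hy) h2
        · exact ⟨h1, h2⟩
    · rw [if_neg hy]
      simp only [List.mem_cons, pvGo_mem xs (y :: s) x, List.mem_cons]
      constructor
      · rintro (rfl | ⟨h1, h2⟩)
        · exact ⟨Or.inl rfl, hy⟩
        · exact ⟨Or.inr h1, fun hx => h2 (Or.inr hx)⟩
      · rintro ⟨rfl | h1, h2⟩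
        · exact Or.inl rfl
        · by_cases hxy : x = y
          · exact Or.inl hxy
          · exact Or.inr ⟨h1, fun hx => (hx.elim hxy h2)⟩

theorem pvGo_append : ∀ (a b s : List String), pvGo (a ++ b) s = pvGo a s ++ pvGo b (pvGo a s ++ s)
  | [], b, s => by simp [pvGo]
  | x :: xs, b, s => by
    simp only [List.cons_append, pvGo]
    by_cases hx : x ∈ s
    · rw [if_pos hx, if_pos hx, pvGo_append xs b s]
    · rw [if_neg hx, if_neg hx, pvGo_append xs b (x :: s), List.cons_append]
      refine congrArg _ (congrArg _ (pvGo_congr b _ _ (fun y => ?_)))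
      simp only [List.mem_append, List.mem_cons]
      tauto

theorem pvGo_eq_filter : ∀ (l : List String), l.Nodup → ∀ (s : List String),
    pvGo l s = l.filter (fun x => x ∉ s)
  | [], _, _ => rfl
  | x :: xs, hnd, s => by
    have hx_not : x ∉ xs := (List.nodup_cons.mp hnd).1
    have hnd' : xs.Nodup := (List.nodup_cons.mp hnd).2
    simp only [pvGo, List.filter_cons]
    by_cases hx : x ∈ s
    · rw [if_pos hx, pvGo_eq_filter xs hnd' s]
      simp [hx]
    · rw [if_neg hx, pvGo_eq_filter xs hnd' (x :: s)]
      simp only [hx, decide_not, decide_eq_true_eq]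
      rw [if_pos (by simpa using hx)]
      refine congrArg _ (List.filter_congr (fun y hy => ?_))
      have hyx : y ≠ x := fun h => hx_not (h ▸ hy)
      simp [List.mem_cons, hyx]

theorem pvGo_eq_nil {l s : List String} (h : ∀ x ∈ l, x ∈ s) : pvGo l s = [] := by
  induction l with
  | nil => rfl
  | cons x xs ih =>
    simp only [pvGo, if_pos (h x List.mem_cons_self)]
    exact ih (fun y hy => h y (List.mem_cons_of_mem _ hy))

-- closed characterization of Source B's inner loop, on a duplicate-free target list
theorem pvBScan_eq (output : String) :
    ∀ (ts : List String), ts.Nodup → ∀ (seen : PySem.Set String),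
    pvBScan output ts seen =
      if output ∈ ts ∧ output ∉ seen then Sum.inl ()
      else Sum.inr (seen ++ ts.filter (fun v => v ∉ seen), ts.filter (fun v => v ∉ seen))
  | [], _, seen => by simp [pvBScan]
  | v :: vs, hnd, seen => by
    have hv_not : v ∉ vs := (List.nodup_cons.mp hnd).1
    have hnd' : vs.Nodup := (List.nodup_cons.mp hnd).2
    simp only [pvBScan]
    by_cases hv : v ∈ seen
    · rw [if_pos hv, pvBScan_eq output vs hnd' seen]
      have hcond : (output ∈ vs ∧ output ∉ seen) ↔ (output ∈ v :: vs ∧ output ∉ seen) := by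
        simp only [List.mem_cons]
        constructor
        · rintro ⟨h1, h2⟩; exact ⟨Or.inr h1, h2⟩
        · rintro ⟨rfl | h1, h2⟩
          · exact absurd hv h2
          · exact ⟨h1, h2⟩
      have hfil : (v :: vs).filter (fun w => w ∉ seen) = vs.filter (fun w => w ∉ seen) := by
        rw [List.filter_cons, if_neg (by simpa using hv)]
      rw [hfil]
      by_cases hc : output ∈ vs ∧ output ∉ seen
      · rw [if_pos hc, if_pos (hcond.mp hc)]
      · rw [if_neg hc, if_neg (fun h => hc (hcond.mpr h))]
    · rw [if_neg hv]
      by_cases ho : v = output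
      · rw [if_pos ho]
        rw [if_pos ⟨ho ▸ List.mem_cons_self, ho ▸ hv⟩]
      · rw [if_neg ho]
        have hadd : PySem.Set.add seen v = seen ++ [v] := by
          simp [PySem.Set.add, PySem.Set.contains, hv]
        rw [pvBScan_eq output vs hnd' (PySem.Set.add seen v), hadd]
        have hmemv : ∀ w, w ∈ seen ++ [v] ↔ (w ∈ seen ∨ w = v) := by
          intro w; simp
        have hcond : (output ∈ vs ∧ output ∉ seen ++ [v]) ↔ (output ∈ v :: vs ∧ output ∉ seen) := by
          simp only [List.mem_cons, hmemv]
          constructor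
          · rintro ⟨h1, h2⟩
            exact ⟨Or.inr h1, fun hs => h2 (Or.inl hs)⟩
          · rintro ⟨rfl | h1, h2⟩
            · exact absurd rfl (Ne.symm ho)
            · exact ⟨h1, fun h => h.elim h2 (fun he => ho he.symm)⟩
        have hfil : vs.filter (fun w => w ∉ seen ++ [v]) = vs.filter (fun w => w ∉ seen) := by
          refine List.filter_congr (fun w hw => ?_)
          simp only [hmemv, decide_eq_decide]
          constructor
          · intro h hs; exact h (Or.inl hs)
          · rintro h (hs | rfl)
            · exact h hs
            · exact hv_not hw
        have hfil2 : (v :: vs).filter (fun w => w ∉ seen) = v :: vs.filter (fun w => w ∉ seen) := by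
          rw [List.filter_cons, if_pos (by simpa using hv)]
        by_cases hc : output ∈ v :: vs ∧ output ∉ seen
        · rw [if_pos (hcond.mpr hc), if_pos hc]
        · rw [if_neg (fun h => hc (hcond.mp h)), if_neg hc, hfil, hfil2]
          simp [List.append_assoc]

theorem pvKeys_nodup (t : List (String × String × Int)) : (pvKeys t).Nodup := by
  unfold pvKeys
  exact PySem.Dict.nodup_keys_foldl_insert_key t (fun x => (x.1, x.2.1)) (fun d x => x.2.2)
    PySem.Dict.empty PySem.Dict.nodup_keys_empty

theorem pvTargets_nodup {keys : List (String × String)} (hk : keys.Nodup) (u : String) :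
    ((keys.filter (fun k => k.1 == u)).map (fun k => k.2)).Nodup := by
  refine List.Nodup.map_on ?_ (hk.filter _)
  intro x hx y hy hxy
  have hx1 : x.1 = u := by simpa using (List.mem_filter.mp hx).2
  have hy1 : y.1 = u := by simpa using (List.mem_filter.mp hy).2
  exact Prod.ext_iff.mpr ⟨hx1.trans hy1.symm, hxy⟩

theorem pvMem_targets {keys : List (String × String)} {u v : String} :
    v ∈ (keys.filter (fun k => k.1 == u)).map (fun k => k.2) ↔
      ∃ k ∈ keys, k.1 = u ∧ k.2 = v := by
  simp only [List.mem_map, List.mem_filter, beq_iff_eq]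
  constructor
  · rintro ⟨k, ⟨hk, hk1⟩, rfl⟩; exact ⟨k, hk, hk1, rfl⟩
  · rintro ⟨k, hk, hk1, rfl⟩; exact ⟨k, ⟨hk, hk1⟩, rfl⟩

-- A's filtered-scan appends seen as a filter of the adjacency targets
theorem pvVsA_eq {keys : List (String × String)} (u : String) (e' : List String) :
    (keys.filter (fun k => k.1 = u ∧ k.2 ∉ e')).map (fun k => k.2) =
      ((keys.filter (fun k => k.1 == u)).map (fun k => k.2)).filter (fun v => v ∉ e') := by
  induction keys with
  | nil => rfl
  | cons k ks ih =>
    simp only [List.filter_cons]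
    by_cases h1 : k.1 = u
    · by_cases h2 : k.2 ∉ e'
      · rw [if_pos (by simp [h1, h2]), if_pos (by simp [h1])]
        simp only [List.map_cons, List.filter_cons]
        rw [if_pos (by simpa using h2)]
        exact congrArg _ ih
      · rw [if_neg (by simp [h2]), if_pos (by simp [h1])]
        simp only [List.map_cons, List.filter_cons]
        rw [if_neg (by simpa using h2)]
        exact ih
    · rw [if_neg (by simp [h1]), if_neg (by simp [h1])]
      exact ih

-- the simulation: A's queue/explored state corresponds to B's todo/seen state
set_option maxHeartbeats 2000000 in
theorem pvSim (output input : String) (keys : List (String × String)) (U : List String)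
    (hU : ∀ k ∈ keys, k.2 ∈ U)
    (hadj : ∀ u : String, ∀ v ∈ (pvBAdj keys).getD u [], v ∈ U)
    (hkeys : keys.Nodup)
    (q e : List String) (hq : ∀ x ∈ q, x ∈ U) (seen : PySem.Set String)
    (hseen : ∀ x, x ∈ seen ↔ (x ∈ e ∨ x ∈ pvGo q e))
    (P1 : ∀ x ∈ q, x = input ∨ x ≠ output)
    (P2 : input ∈ e ∨ (e = [] ∧ q = [input]))
    (P3 : ∀ a b : String, (a, b) ∈ keys → a ∈ e → b ∈ e ∨ b ∈ q) :
    pvALoop output keys U hU q e hq = pvBLoop output (pvBAdj keys) U hadj (pvGo q e) seen := by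
  match q, hq, hseen, P1, P2, P3 with
  | [], hq, hseen, P1, P2, P3 => simp [pvALoop, pvGo, pvBLoop]
  | u :: tail, hq, hseen, P1, P2, P3 =>
    have htnd := pvTargets_nodup hkeys u
    by_cases hu : u ∈ e
    · -- duplicate pop: A re-pops an explored unit; B's state is unchanged
      have hnc : ¬ ∃ k ∈ keys, k.1 = u ∧ k.2 = output ∧ output ∉ e ++ [u] := by
        rintro ⟨k, hk, hk1, hk2, hk3⟩
        have hk' : (u, output) ∈ keys := by
          have hke : k = (u, output) := Prod.ext_iff.mpr ⟨hk1, hk2⟩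
          rwa [hke] at hk
        rcases P3 u output hk' hu with ho | ho
        · exact hk3 (by simp [ho])
        · rcases List.mem_cons.mp ho with rfl | ho
          · exact hk3 (by simp [hu])
          · rcases P1 output (List.mem_cons_of_mem _ ho) with rfl | hne
            · rcases P2 with hin | ⟨he, hqq⟩
              · exact hk3 (by simp [hin])
              · subst he; cases hu
            · exact hne rfl
      have hsubA : ∀ v ∈ ((keys.filter (fun k => k.1 == u)).map (fun k => k.2)).filter
          (fun v => v ∉ e ++ [u]), v ∈ tail ∧ v ∉ e ++ [u] := by
        intro v hv
        have hv1 := List.mem_of_mem_filter hv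
        have hv2 : v ∉ e ++ [u] := by simpa using (List.mem_filter.mp hv).2
        rcases pvMem_targets.mp hv1 with ⟨k, hk, hk1, hk2⟩
        have hk' : (u, v) ∈ keys := by
          have hke : k = (u, v) := Prod.ext_iff.mpr ⟨hk1, hk2⟩
          rwa [hke] at hk
        rcases P3 u v hk' hu with hv3 | hv3
        · exact absurd (by simp [hv3] : v ∈ e ++ [u]) hv2
        · rcases List.mem_cons.mp hv3 with rfl | hv3
          · exact absurd (by simp : v ∈ e ++ [v]) hv2
          · exact ⟨hv3, hv2⟩
      have hgoe : pvGo (u :: tail) e = pvGo tail e := by simp [pvGo, hu]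
      simp only [pvALoop]
      split
      · next r heq =>
        rw [pvAScan_eq, if_neg hnc] at heq
        cases heq
      · next vs heq =>
        rw [pvAScan_eq, if_neg hnc, pvVsA_eq] at heq
        injection heq with heq
        subst heq
        have hgo2 : pvGo (tail ++ ((keys.filter (fun k => k.1 == u)).map (fun k => k.2)).filter
            (fun v => v ∉ e ++ [u])) (e ++ [u]) = pvGo tail e := by
          rw [pvGo_append]
          have h1 : pvGo tail (e ++ [u]) = pvGo tail e :=
            pvGo_congr _ _ _ (fun x => by
              simp only [List.mem_append, List.mem_singleton]
              constructor
              · rintro (hx | rfl)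
                · exact hx
                · exact hu
              · exact Or.inl)
          have h2 : pvGo _ (pvGo tail (e ++ [u]) ++ (e ++ [u])) = [] :=
            pvGo_eq_nil (fun v hv => by
              rcases hsubA v hv with ⟨hvt, hve⟩
              exact List.mem_append.mpr (Or.inl ((pvGo_mem _ _ _).mpr ⟨hvt, hve⟩)))
          rw [h2, h1, List.append_nil]
        split
        · next hte =>
          have ht0 : tail = [] := (List.append_eq_nil_iff.mp hte).1
          rw [hgoe, ht0]
          simp [pvGo, pvBLoop]
        · next hte =>
          rw [pvSim output input keys U hU hadj hkeys _ _
              (fun x hx => by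
                rcases List.mem_append.mp hx with hx | hx
                · exact hq x (List.mem_cons_of_mem _ hx)
                · rcases pvMem_targets.mp (List.mem_of_mem_filter hx) with ⟨k, hk, _, rfl⟩
                  exact hU k hk)
              seen
              (fun x => by
                rw [hseen x, hgo2, hgoe]
                simp only [List.mem_append, List.mem_singleton]
                constructor
                · rintro (hx | hx)
                  · exact Or.inl (Or.inl hx)
                  · exact Or.inr hx
                · rintro ((hx | rfl) | hx)
                  · exact Or.inl hx
                  · exact Or.inl hu
                  · exact Or.inr hx)
              (fun x hx => by
                rcases List.mem_append.mp hx with hx | hx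
                · exact P1 x (List.mem_cons_of_mem _ hx)
                · exact P1 x (List.mem_cons_of_mem _ (hsubA x hx).1))
              (by
                rcases P2 with hin | ⟨he, hqq⟩
                · exact Or.inl (by simp [hin])
                · subst he; cases hu)
              (fun a b hab ha => by
                have ha' : a ∈ e := by
                  rcases List.mem_append.mp ha with ha | ha
                  · exact ha
                  · rcases List.mem_singleton.mp ha with rfl; exact hu
                rcases P3 a b hab ha' with hb | hb
                · exact Or.inl (by simp [hb])
                · rcases List.mem_cons.mp hb with rfl | hb
                  · exact Or.inl (by simp [hu])
                  · exact Or.inr (List.mem_append.mpr (Or.inl hb)))]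
          rw [hgo2, hgoe]
    · -- fresh pop: both sides explore u
      have hgoe : pvGo (u :: tail) e = u :: pvGo tail (e ++ [u]) := by
        simp only [pvGo, if_neg hu]
        refine congrArg _ (pvGo_congr _ _ _ (fun x => by
          simp only [List.mem_cons, List.mem_append, List.mem_singleton]
          tauto))
      have hadjU : (pvBAdj keys).getD u [] = (keys.filter (fun k => k.1 == u)).map (fun k => k.2) :=
        pvBAdj_getD keys u
      have hseen2 : ∀ v, v ∈ seen ↔ (v ∈ e ++ [u] ∨ v ∈ pvGo tail (e ++ [u])) := by
        intro v
        rw [hseen v, hgoe]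
        simp only [List.mem_cons, List.mem_append, List.mem_singleton]
        tauto
      have houtiff : output ∉ e ++ [u] ↔ output ∉ seen := by
        constructor
        · intro h hs
          rcases (hseen2 output).mp hs with he | hgo
          · exact h he
          · have := (pvGo_mem _ _ _).mp hgo
            rcases P1 output (List.mem_cons_of_mem _ this.1) with rfl | hne
            · rcases P2 with hin | ⟨he0, hqq⟩
              · exact h (by simp [hin])
              · have : tail = [] := by
                  have := congrArg List.tail hqq; simpa using this
                rw [this] at hgo; cases hgo
            · exact hne rfl
        · intro h he
          exact h ((hseen2 output).mpr (Or.inl he))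
      have hcond : (∃ k ∈ keys, k.1 = u ∧ k.2 = output ∧ output ∉ e ++ [u]) ↔
          (output ∈ (keys.filter (fun k => k.1 == u)).map (fun k => k.2) ∧ output ∉ seen) := by
        constructor
        · rintro ⟨k, hk, h1, h2, h3⟩
          exact ⟨pvMem_targets.mpr ⟨k, hk, h1, h2⟩, houtiff.mp h3⟩
        · rintro ⟨ht, hs⟩
          rcases pvMem_targets.mp ht with ⟨k, hk, h1, h2⟩
          exact ⟨k, hk, h1, h2, houtiff.mpr hs⟩
      rw [hgoe]
      simp only [pvALoop, pvBLoop]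
      by_cases hcB : output ∈ (keys.filter (fun k => k.1 == u)).map (fun k => k.2) ∧ output ∉ seen
      · split
        · next r heq =>
          rw [pvAScan_eq, if_pos (hcond.mpr hcB)] at heq
          injection heq with heq
          subst heq
          split
          · next heq2 => rfl
          · next p heq2 =>
            rw [hadjU, pvBScan_eq output _ htnd, if_pos hcB] at heq2
            cases heq2
        · next vs heq =>
          rw [pvAScan_eq, if_pos (hcond.mpr hcB)] at heq
          cases heq
      · have hnc : ¬ ∃ k ∈ keys, k.1 = u ∧ k.2 = output ∧ output ∉ e ++ [u] :=
          fun h => hcB (hcond.mp h)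
        have hvsB : (((keys.filter (fun k => k.1 == u)).map (fun k => k.2)).filter
              (fun v => v ∉ e ++ [u])).filter (fun v => v ∉ pvGo tail (e ++ [u]) ++ (e ++ [u])) =
            ((keys.filter (fun k => k.1 == u)).map (fun k => k.2)).filter (fun v => v ∉ seen) := by
          rw [List.filter_filter]
          refine List.filter_congr (fun v _ => ?_)
          have hv' := hseen2 v
          rw [Bool.eq_iff_iff]
          simp only [Bool.and_eq_true, decide_eq_true_eq, List.mem_append] at *
          tauto
        have hgo2 : pvGo (tail ++ ((keys.filter (fun k => k.1 == u)).map (fun k => k.2)).filter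
            (fun v => v ∉ e ++ [u])) (e ++ [u]) =
            pvGo tail (e ++ [u]) ++
              ((keys.filter (fun k => k.1 == u)).map (fun k => k.2)).filter (fun v => v ∉ seen) := by
          rw [pvGo_append, pvGo_eq_filter _ (htnd.filter _) _, hvsB]
        split
        · next r heq =>
          rw [pvAScan_eq, if_neg hnc] at heq
          cases heq
        · next vs heq =>
          rw [pvAScan_eq, if_neg hnc, pvVsA_eq] at heq
          injection heq with heq
          subst heq
          split
          · next hte =>
            -- A's queue empties: B's next todo list is empty as well
            have ht0 : tail = [] := (List.append_eq_nil_iff.mp hte).1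
            have hv0 : ((keys.filter (fun k => k.1 == u)).map (fun k => k.2)).filter
                (fun v => v ∉ e ++ [u]) = [] := (List.append_eq_nil_iff.mp hte).2
            have hvB0 : ((keys.filter (fun k => k.1 == u)).map (fun k => k.2)).filter
                (fun v => v ∉ seen) = [] := by
              rw [List.filter_eq_nil_iff] at hv0 ⊢
              intro v hv hvs
              refine hv0 v hv ?_
              simp only [decide_not, Bool.not_eq_eq_eq_not, Bool.not_true,
                decide_eq_false_iff_not] at hvs ⊢
              intro hve
              exact hvs ((hseen2 v).mpr (Or.inl hve))
            split
            · next heq2 =>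
              rw [hadjU, pvBScan_eq output _ htnd, if_neg hcB] at heq2
              cases heq2
            · next p heq2 =>
              rw [hadjU, pvBScan_eq output _ htnd, if_neg hcB] at heq2
              injection heq2 with heq2
              rw [Prod.mk.injEq] at heq2
              obtain ⟨h1, h2⟩ := heq2
              subst h1
              subst h2
              rw [hvB0, ht0]
              simp [pvGo, pvBLoop]
          · next hte =>
            split
            · next heq2 =>
              rw [hadjU, pvBScan_eq output _ htnd, if_neg hcB] at heq2
              cases heq2
            · next p heq2 =>
              rw [hadjU, pvBScan_eq output _ htnd, if_neg hcB] at heq2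
              injection heq2 with heq2
              rw [Prod.mk.injEq] at heq2
              obtain ⟨h1, h2⟩ := heq2
              subst h1
              subst h2
              rw [pvSim output input keys U hU hadj hkeys _ _
                  (fun x hx => by
                    rcases List.mem_append.mp hx with hx | hx
                    · exact hq x (List.mem_cons_of_mem _ hx)
                    · rcases pvMem_targets.mp (List.mem_of_mem_filter hx) with ⟨k, hk, _, rfl⟩
                      exact hU k hk)
                  (seen ++ ((keys.filter (fun k => k.1 == u)).map (fun k => k.2)).filter
                    (fun v => v ∉ seen))
                  (fun x => by
                    have hx := hseen2 x
                    rw [hgo2]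
                    simp only [List.mem_append] at hx ⊢
                    tauto)
                  (fun x hx => by
                    rcases List.mem_append.mp hx with hx | hx
                    · exact P1 x (List.mem_cons_of_mem _ hx)
                    · have hxt := List.mem_of_mem_filter hx
                      have hxe : x ∉ e ++ [u] := by simpa using (List.mem_filter.mp hx).2
                      right
                      rintro rfl
                      exact hcB ⟨hxt, houtiff.mp hxe⟩)
                  (by
                    rcases P2 with hin | ⟨he0, hqq⟩
                    · exact Or.inl (by simp [hin])
                    · have hui : u = input := by
                        have := congrArg (fun l => l.headD "") hqq; simpa using this
                      exact Or.inl (by simp [hui]))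
                  (fun a b hab ha => by
                    rcases List.mem_append.mp ha with ha | ha
                    · rcases P3 a b hab ha with hb | hb
                      · exact Or.inl (by simp [hb])
                      · rcases List.mem_cons.mp hb with rfl | hb
                        · exact Or.inl (by simp)
                        · exact Or.inr (List.mem_append.mpr (Or.inl hb))
                    · rcases List.mem_singleton.mp ha with rfl
                      by_cases hbe : b ∈ e ++ [a]
                      · exact Or.inl hbe
                      · refine Or.inr (List.mem_append.mpr (Or.inr ?_))
                        rw [List.mem_filter]
                        exact ⟨pvMem_targets.mpr ⟨(a, b), hab, rfl, rfl⟩, by simpa using hbe⟩)]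
              rw [hgo2]
  termination_by ((U.filter (fun x => x ∉ e)).length, (q.filter (fun x => x ∈ e)).length)
  decreasing_by
    · -- duplicate pop: distinct-unexplored count unchanged, explored-in-queue count drops
      have h1 : (U.filter (fun x => x ∉ e ++ [u])).length =
          (U.filter (fun x => x ∉ e)).length := by
        congr 1
        apply List.filter_congr
        intro x _
        simp only [List.mem_append, List.mem_singleton, decide_eq_decide]
        constructor
        · intro hnx hx; exact hnx (Or.inl hx)
        · rintro hnx (hx | rfl)
          · exact hnx hx
          · exact hnx hu
      rw [h1]
      apply Prod.Lex.right
      have h2 : ((tail ++ ((keys.filter (fun k => k.1 == u)).map (fun k => k.2)).filter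
            (fun v => v ∉ e ++ [u])).filter (fun x => x ∈ e ++ [u])).length =
          (tail.filter (fun x => x ∈ e)).length := by
        rw [List.filter_append]
        have hvs : (((keys.filter (fun k => k.1 == u)).map (fun k => k.2)).filter
            (fun v => v ∉ e ++ [u])).filter (fun x => x ∈ e ++ [u]) = [] := by
          rw [List.filter_eq_nil_iff]
          intro v hv
          have := (hsubA v hv).2
          simpa using this
        rw [hvs, List.append_nil]
        congr 1
        apply List.filter_congr
        intro x _
        simp only [List.mem_append, List.mem_singleton, decide_eq_decide]
        constructor
        · rintro (hx | rfl)
          · exact hx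
          · exact hu
        · exact Or.inl
      rw [h2]
      have h3 : (u :: tail).filter (fun x => x ∈ e) = u :: tail.filter (fun x => x ∈ e) := by
        rw [List.filter_cons, if_pos (by simpa using hu)]
      rw [h3]
      exact Nat.lt_succ_self _
    · -- fresh pop: distinct-unexplored count drops
      apply Prod.Lex.left
      apply pvFilterLengthLt (p := fun x => x ∉ e) (q := fun x => x ∉ e ++ [u])
      · intro x hx
        simp only [List.mem_append, decide_eq_true_eq] at hx ⊢
        intro h; exact hx (Or.inl h)
      · exact hq u List.mem_cons_self
      · simpa using hu
      · simp

-- ports agree at the entry states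

-- ===== VERDICT (by name: the statement is the Claim_ definition above) =====
theorem find_penultimate_conversion_spec : Claim_equal_find_penultimate_conversion := by
  intro input_unit output_unit conversion_table _
  unfold Spec_find_penultimate_conversion
  unfold find_penultimate_conversion find_penultimate_conversion_alt
  have h := pvSim output_unit input_unit (pvKeys conversion_table)
    (input_unit :: (pvKeys conversion_table).map (fun k => k.2))
    (fun k hk => List.mem_cons_of_mem _ (List.mem_map_of_mem hk))
    (fun u v hv => by
      rw [pvBAdj_getD] at hv
      rcases List.mem_map.mp hv with ⟨k, hk, rfl⟩
      exact List.mem_cons_of_mem _ (List.mem_map_of_mem (List.mem_of_mem_filter hk)))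
    (pvKeys_nodup conversion_table)
    [input_unit] []
    (fun x hx => by
      rcases List.mem_cons.mp hx with rfl | hx
      · exact List.mem_cons_self
      · cases hx)
    (PySem.Set.ofList [input_unit])
    (by
      intro x
      simp [PySem.Set.ofList, PySem.Set.add, PySem.Set.contains, PySem.Set.empty, pvGo])
    (by
      intro x hx
      rcases List.mem_cons.mp hx with rfl | hx
      · exact Or.inl rfl
      · cases hx)
    (Or.inr ⟨rfl, rfl⟩)
    (fun a b _ ha => by cases ha)
  rw [h]
  have hgo : pvGo [input_unit] [] = [input_unit] := by simp [pvGo]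
  rw [hgo]
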